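-- pv_equiv track=rewrite | github.com/Adrian-Steinert/Myo-GestureRecognition | Code/Tools/CSVconverter.py | eliminate_duplicates
-- ===== SOURCE A (Python) =====
-- from collections import Counter
--
-- def eliminate_duplicates(list_with_duplicates):
--     cleaned_list = []
--
--     duplicate_counter = Counter(list_with_duplicates)
--
--     for element, count in duplicate_counter.items():
--         if count < 2:
--             cleaned_list.append(element)
--         else:
--             for increment_by_one in range(count):
--                 cleaned_list.append(element + increment_by_one)
--
--     return sorted(cleaned_list)
-- ===== SOURCE B (Python) =====
-- def eliminate_duplicates(list_with_duplicates):
--     # Sort once, then spread each run of equal values into consecutive integers.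
--     s = sorted(list_with_duplicates)
--     result = []
--     i = 0
--     while i < len(s):
--         j = i
--         while j < len(s) and s[j] == s[i]:
--             j += 1
--         for k in range(j - i):
--             result.append(s[i] + k)
--         i = j
--     return sorted(result)
-- ===== Notes on version B (the rewrite author's own statement) =====
-- stated objective: alternative
-- what changed: Replaces the hash-based Counter pass over first-occurrence key order with a sort-then-scan over adjacent runs of equal values, spreading each run into consecutive integers.
import Mathlib
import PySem

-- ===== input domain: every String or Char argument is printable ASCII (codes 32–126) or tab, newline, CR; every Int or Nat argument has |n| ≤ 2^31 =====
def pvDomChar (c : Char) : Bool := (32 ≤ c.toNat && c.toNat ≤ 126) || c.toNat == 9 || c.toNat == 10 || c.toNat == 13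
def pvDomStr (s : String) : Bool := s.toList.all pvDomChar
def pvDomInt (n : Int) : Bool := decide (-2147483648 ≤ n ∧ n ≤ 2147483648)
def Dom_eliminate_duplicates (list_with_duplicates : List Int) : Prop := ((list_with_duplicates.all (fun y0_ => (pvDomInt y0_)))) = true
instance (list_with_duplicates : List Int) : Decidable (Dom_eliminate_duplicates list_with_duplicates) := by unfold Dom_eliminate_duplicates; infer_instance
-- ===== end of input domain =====

-- B replaces A's Counter-and-spread pass with a sort-then-scan over adjacent runs (alternative decomposition, same result).


-- ===== PORT A =====
def eliminate_duplicates (list_with_duplicates : List Int) : List Int :=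
  let duplicate_counter := PySem.Dict.counter list_with_duplicates
  let cleaned_list :=
    duplicate_counter.items.foldl (fun cleaned ec =>
      if ec.2 < 2 then cleaned ++ [ec.1]
      else (PySem.List.pyRange 0 ec.2 1).foldl
        (fun cl increment_by_one => cl ++ [ec.1 + increment_by_one]) cleaned) []
  PySem.List.sorted cleaned_list (fun x => x) false

-- ===== PORT B =====
-- the outer 'while i < len(s)' loop of Source B: the inner 'while j < len(s) and s[j] == s[i]'
-- scan of the run of values equal to s[i] is takeWhile/dropWhile past the head
def pvSpreadRuns : List Int → List Int
  | [] => []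
  | x :: xs =>
    (PySem.List.pyRange 0 ((xs.takeWhile (fun y => y == x)).length + 1 : Int) 1).map (fun k => x + k)
      ++ pvSpreadRuns (xs.dropWhile (fun y => y == x))
  termination_by s => s.length
  decreasing_by
    simpa using Nat.lt_succ_of_le (List.length_dropWhile_le _ _)

def eliminate_duplicates_alt (list_with_duplicates : List Int) : List Int :=
  PySem.List.sorted (pvSpreadRuns (PySem.List.sorted list_with_duplicates (fun x => x) false)) (fun x => x) false

-- ===== PRECONDITION & SPEC =====
def Spec_eliminate_duplicates (list_with_duplicates : List Int) (out : List Int) : Prop := out = eliminate_duplicates_alt list_with_duplicates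
instance (list_with_duplicates : List Int) (out : List Int) : Decidable (Spec_eliminate_duplicates list_with_duplicates out) := by unfold Spec_eliminate_duplicates; infer_instance

-- ===== CLAIM (what is proved, stated in full; the proofs are below) =====
def Claim_equal_eliminate_duplicates : Prop := ∀ (list_with_duplicates : List Int), Dom_eliminate_duplicates list_with_duplicates → Spec_eliminate_duplicates list_with_duplicates (eliminate_duplicates list_with_duplicates)

-- ===== LEMMAS AND PROOFS =====

-- the multiset contribution of one distinct value with count c: value, value+1, …, value+c-1
def pvSpread (x c : Int) : List Int := (PySem.List.pyRange 0 c 1).map (fun k => x + k)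

-- A's pre-sort list is the flatMap of pvSpread over the distinct values (counts of members are ≥ 1,
-- so the 'count < 2' branch coincides with a one-element spread)
lemma pvA_cleaned (xs : List Int) :
    (PySem.Dict.counter xs).items.foldl (fun cleaned ec =>
      if ec.2 < 2 then cleaned ++ [ec.1]
      else (PySem.List.pyRange 0 ec.2 1).foldl
        (fun cl increment_by_one => cl ++ [ec.1 + increment_by_one]) cleaned) []
    = (PySem.Set.ofList xs).flatMap (fun k => pvSpread k (xs.count k)) := by
  rw [PySem.Dict.items_counter]
  have hstep : ∀ (cleaned : List Int) (ec : Int × Int),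
      (if ec.2 < 2 then cleaned ++ [ec.1]
       else (PySem.List.pyRange 0 ec.2 1).foldl
         (fun cl increment_by_one => cl ++ [ec.1 + increment_by_one]) cleaned)
      = cleaned ++ (if ec.2 < 2 then [ec.1] else pvSpread ec.1 ec.2) := by
    intro cleaned ec
    split_ifs with h
    · rfl
    · rw [PySem.List.foldl_append_singleton_eq_map]; rfl
  simp only [hstep]
  rw [PySem.List.foldl_append_eq_flatMap, List.flatMap_map, List.nil_append]
  apply List.flatMap_congr
  intro k hk
  have hpos : 0 < xs.count k := List.count_pos_iff.mpr ((PySem.Set.mem_ofList xs k).mp hk)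
  by_cases h1 : xs.count k = 1
  · simp [h1, pvSpread, PySem.List.pyRange_one]
  · have : ¬ ((xs.count k : Int) < 2) := by omega
    simp [this]

-- on a sorted list everything after the run of the head is strictly larger than the head
lemma pv_dropWhile_gt (xs : List Int) (x : Int) (hp : xs.Pairwise (· ≤ ·))
    (hb : ∀ y ∈ xs, x ≤ y) : ∀ y ∈ xs.dropWhile (fun y => y == x), x < y := by
  induction xs with
  | nil => simp
  | cons a as ih =>
    by_cases ha : a = x
    · rw [List.dropWhile_cons_of_pos (by simp [ha])]
      exact ih hp.of_cons (fun y hy => hb y (List.mem_cons_of_mem _ hy))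
    · rw [List.dropWhile_cons_of_neg (by simp [ha])]
      intro y hy
      have hxa : x < a := lt_of_le_of_ne (hb a (List.mem_cons_self)) (fun h => ha h.symm)
      rcases List.mem_cons.mp hy with rfl | hy
      · exact hxa
      · exact lt_of_lt_of_le hxa (List.rel_of_pairwise_cons hp hy)

-- B's run scan on a sorted list is, up to order, the flatMap of pvSpread over its distinct values
lemma pvB_runs (s : List Int) (hs : s.Pairwise (· ≤ ·)) :
    (pvSpreadRuns s).Perm ((PySem.Set.ofList s).flatMap (fun k => pvSpread k (s.count k))) := by
  induction s using pvSpreadRuns.induct with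
  | case1 => simp [pvSpreadRuns]
  | case2 x xs ih =>
    rw [pvSpreadRuns]
    set run := xs.takeWhile (fun y => y == x) with hrun
    set rest := xs.dropWhile (fun y => y == x) with hrest
    have hxs : run ++ rest = xs := List.takeWhile_append_dropWhile
    have hble : ∀ y ∈ xs, x ≤ y := fun y hy => List.rel_of_pairwise_cons hs hy
    have hgt : ∀ y ∈ rest, x < y := pv_dropWhile_gt xs x hs.of_cons hble
    have hrunx : ∀ y ∈ run, y = x := by
      intro y hy; simpa using List.mem_takeWhile_imp hy
    have hrestp : rest.Pairwise (· ≤ ·) := hs.of_cons.sublist (List.dropWhile_sublist _)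
    have hcx : (x :: xs).count x = run.length + 1 := by
      rw [← hxs, List.count_cons_self, List.count_append]
      have h1 : run.count x = run.length := by
        rw [List.count_eq_length]; intro y hy; simp [hrunx y hy]
      have h2 : rest.count x = 0 := by
        rw [List.count_eq_zero]; intro hmem; exact absurd rfl (ne_of_gt (hgt x hmem))
      omega
    have hck : ∀ k ∈ rest, (x :: xs).count k = rest.count k := by
      intro k hk
      have hkx : k ≠ x := ne_of_gt (hgt k hk)
      have hrun0 : List.count k run = 0 := by
        rw [List.count_eq_zero]; intro hmem; exact hkx (hrunx k hmem)
      rw [← hxs]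
      simp [List.count_append, hrun0, Ne.symm hkx]
    -- the distinct values of x :: xs are x followed by those of rest, as a set
    have hset : (PySem.Set.ofList (x :: xs)).Perm (x :: PySem.Set.ofList rest) := by
      rw [List.perm_ext_iff_of_nodup (PySem.Set.nodup_ofList _)
        (by simp [List.nodup_cons, PySem.Set.nodup_ofList]
            exact fun hmem => absurd rfl (ne_of_gt (hgt x hmem)))]
      intro a
      simp only [PySem.Set.mem_ofList, List.mem_cons]
      constructor
      · rintro (rfl | ha)
        · exact Or.inl rfl
        · rw [← hxs] at ha
          rcases List.mem_append.mp ha with h | h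
          · exact Or.inl (hrunx a h)
          · exact Or.inr h
      · rintro (rfl | ha)
        · exact Or.inl rfl
        · exact Or.inr (by rw [← hxs]; exact List.mem_append_right _ ha)
    refine List.Perm.trans ?_ ((List.Perm.flatMap_right _ hset.symm))
    rw [List.flatMap_cons]
    have hhead : (PySem.List.pyRange 0 ((run.length : Int) + 1) 1).map (fun k => x + k)
        = pvSpread x ((x :: xs).count x) := by
      rw [hcx]; simp [pvSpread]
    rw [hhead]
    apply List.Perm.append_left
    have hcongr : (PySem.Set.ofList rest).flatMap (fun k => pvSpread k ((x :: xs).count k))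
        = (PySem.Set.ofList rest).flatMap (fun k => pvSpread k (rest.count k)) := by
      apply List.flatMap_congr
      intro k hk
      rw [hck k ((PySem.Set.mem_ofList _ _).mp hk)]
    rw [hcongr]
    exact ih hrestp

-- ===== VERDICT (by name: the statement is the Claim_ definition above) =====
theorem eliminate_duplicates_spec : Claim_equal_eliminate_duplicates := by
  intro xs _
  unfold Spec_eliminate_duplicates eliminate_duplicates eliminate_duplicates_alt
  simp only [pvA_cleaned]
  have hsperm := PySem.List.sorted_perm xs (fun x => x) false
  have hs_pw : (PySem.List.sorted xs (fun x => x) false).Pairwise (· ≤ ·) :=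
    PySem.List.sorted_pairwise xs (fun x => x)
  have hB := pvB_runs _ hs_pw
  apply PySem.List.sorted_eq_sorted_of_perm _ _ _ (fun a b h => h)
  refine List.Perm.trans ?_ hB.symm
  have hcnt : (fun k => pvSpread k ((PySem.List.sorted xs (fun x => x) false).count k))
      = (fun k => pvSpread k (xs.count k)) := funext fun k => by rw [hsperm.count_eq]
  rw [hcnt]
  apply List.Perm.flatMap_right
  rw [List.perm_ext_iff_of_nodup (PySem.Set.nodup_ofList _) (PySem.Set.nodup_ofList _)]
  intro a
  simp [PySem.Set.mem_ofList, PySem.List.mem_sorted]
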